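-- pv_equiv track=rewrite | github.com/yashunsky/GameNet | db/access.py | resolve_access
-- ===== SOURCE A (Python) =====
-- GRANTED = '1'
--
-- DENIED = '-1'
--
-- DEFAULT = '0'
--
-- def resolve_access(access_table):
--     '''Resolve access_table: for each column,
--     the access is granted if there is at least one GRANTED entry
--     and no DENIED entries.
--     '''
--     answer = []
--
--     for column in zip(*access_table): # Matrix transpose
--         if DENIED in column:
--             answer.append(DENIED)
--         elif GRANTED in column:
--             answer.append(GRANTED)
--         else:
--             answer.append(DEFAULT)
--
--     return answer
-- ===== SOURCE B (Python) =====
-- GRANTED = '1'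
--
-- DENIED = '-1'
--
-- DEFAULT = '0'
--
-- def resolve_access(access_table):
--     '''Resolve access_table: for each column,
--     the access is granted if there is at least one GRANTED entry
--     and no DENIED entries.
--     '''
--     if not access_table:
--         return []
--     n = min(map(len, access_table))
--     state = [(False, False)] * n
--     for row in access_table:
--         state = [(d or cell == DENIED, g or cell == GRANTED)
--                  for (d, g), cell in zip(state, row)]
--     return [DENIED if d else GRANTED if g else DEFAULT for d, g in state]
-- ===== Notes on version B (the rewrite author's own statement) =====
-- stated objective: alternative
-- what changed: Replaces the explicit transpose (zip(*table)) plus per-column membership tests with a single row-wise pass that folds each row into a per-column (denied, granted) flag-pair state of length min(row lengths).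
import Mathlib
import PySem

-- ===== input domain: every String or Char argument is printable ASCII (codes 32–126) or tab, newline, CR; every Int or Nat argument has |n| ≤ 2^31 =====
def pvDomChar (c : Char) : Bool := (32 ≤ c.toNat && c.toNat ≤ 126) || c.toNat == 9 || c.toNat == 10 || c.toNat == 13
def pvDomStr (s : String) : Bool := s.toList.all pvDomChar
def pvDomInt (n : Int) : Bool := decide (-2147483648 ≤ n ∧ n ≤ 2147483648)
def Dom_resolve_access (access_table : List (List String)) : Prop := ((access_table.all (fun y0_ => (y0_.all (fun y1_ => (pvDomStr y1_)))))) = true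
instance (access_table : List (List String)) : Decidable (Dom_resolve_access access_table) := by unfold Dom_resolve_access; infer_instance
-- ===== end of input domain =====

-- B replaces A's transpose (zip(*table)) + per-column membership tests by one row-wise
-- fold over per-column (denied, granted) flag pairs; same asymptotic cost, different traversal.

-- ===== PORT A =====
-- zip(*rows): take heads while every row is nonempty (exact Python zip truncation).
def pyZipStar (rows : List (List String)) : List (List String) :=
  if rows = [] ∨ rows.any List.isEmpty then []
  else (rows.map (fun r => r.headD "")) :: pyZipStar (rows.map List.tail)
termination_by (rows.headD []).length
decreasing_by
  rename_i h
  simp only [not_or, List.any_eq_true, not_exists, not_and] at h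
  obtain ⟨h1, h2⟩ := h
  match rows, h1, h2 with
  | r :: rs, _, h2 =>
    have hr : r ≠ [] := fun he => h2 r (by simp) (by simp [he])
    cases r with
    | nil => exact absurd rfl hr
    | cons x xs => simp

def resolve_access (access_table : List (List String)) : List String :=
  (pyZipStar access_table).foldl
    (fun answer column =>
      if "-1" ∈ column then answer ++ ["-1"]
      else if "1" ∈ column then answer ++ ["1"]
      else answer ++ ["0"])
    []

-- ===== PORT B =====
def resolve_access_alt (access_table : List (List String)) : List String :=
  match access_table with
  | [] => []
  | r :: rs =>
    -- n = min(map(len, access_table))  (table is nonempty here)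
    let n : Nat := rs.foldl (fun m row => min m row.length) r.length
    let state :=
      (r :: rs).foldl
        (fun st row =>
          (st.zip row).map (fun p => (p.1.1 || p.2 == "-1", p.1.2 || p.2 == "1")))
        (List.replicate n (false, false))
    state.map (fun p => if p.1 then "-1" else if p.2 then "1" else "0")

-- ===== PRECONDITION & SPEC =====
def Spec_resolve_access (access_table : List (List String)) (out : List String) : Prop := out = resolve_access_alt access_table
instance (access_table : List (List String)) (out : List String) : Decidable (Spec_resolve_access access_table out) := by unfold Spec_resolve_access; infer_instance

-- ===== CLAIM (what is proved, stated in full; the proofs are below) =====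
def Claim_equal_resolve_access : Prop := ∀ (access_table : List (List String)), Dom_resolve_access access_table → Spec_resolve_access access_table (resolve_access access_table)

-- ===== LEMMAS AND PROOFS =====

-- number of columns zip(*rows) produces: min of the row lengths (0 for no rows)
def pvMinLen : List (List String) → Nat
  | [] => 0
  | r :: rs => rs.foldl (fun m row => min m row.length) r.length

lemma pvFoldlMin_le_init (rs : List (List String)) (a : Nat) :
    rs.foldl (fun m row => min m row.length) a ≤ a := by
  induction rs generalizing a with
  | nil => simp
  | cons r rs ih =>
    simp only [List.foldl_cons]
    exact le_trans (ih _) (Nat.min_le_left _ _)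

lemma pvFoldlMin_le_mem (rs : List (List String)) (a : Nat) (r : List String) (hr : r ∈ rs) :
    rs.foldl (fun m row => min m row.length) a ≤ r.length := by
  induction rs generalizing a with
  | nil => simp at hr
  | cons q qs ih =>
    rcases List.mem_cons.mp hr with h | h
    · subst h
      simp only [List.foldl_cons]
      exact le_trans (pvFoldlMin_le_init _ _) (Nat.min_le_right _ _)
    · simp only [List.foldl_cons]
      exact ih _ h

lemma pvMinLen_le (t : List (List String)) (r : List String) (hr : r ∈ t) :
    pvMinLen t ≤ r.length := by
  cases t with
  | nil => simp at hr
  | cons q qs =>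
    rcases List.mem_cons.mp hr with h | h
    · subst h; exact pvFoldlMin_le_init _ _
    · exact pvFoldlMin_le_mem _ _ _ h

lemma pvFoldlMin_tail (rs : List (List String)) (a : Nat) :
    (rs.map List.tail).foldl (fun m row => min m row.length) (a - 1)
      = rs.foldl (fun m row => min m row.length) a - 1 := by
  induction rs generalizing a with
  | nil => simp
  | cons r rs ih =>
    simp only [List.map_cons, List.foldl_cons, List.length_tail]
    rw [show min (a - 1) (r.length - 1) = min a r.length - 1 by omega]
    exact ih _

lemma pvMinLen_tail (t : List (List String)) (ht : t ≠ []) :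
    pvMinLen (t.map List.tail) = pvMinLen t - 1 := by
  cases t with
  | nil => exact absurd rfl ht
  | cons r rs =>
    simp only [pvMinLen, List.map_cons, List.length_tail]
    rw [show r.length - 1 = r.length - 1 from rfl, ← pvFoldlMin_tail]

lemma pvMinLen_pos (t : List (List String)) (ht : t ≠ []) (h : ∀ r ∈ t, r ≠ []) :
    1 ≤ pvMinLen t := by
  cases t with
  | nil => exact absurd rfl ht
  | cons r rs =>
    simp only [pvMinLen]
    have : ∀ (qs : List (List String)) (a : Nat), 1 ≤ a → (∀ q ∈ qs, q ≠ []) →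
        1 ≤ qs.foldl (fun m row => min m row.length) a := by
      intro qs
      induction qs with
      | nil => intro a ha _; simpa using ha
      | cons q qs ih =>
        intro a ha hq
        have hql : 1 ≤ q.length :=
          List.length_pos_iff.mpr (hq q (by simp))
        simp only [List.foldl_cons]
        exact ih _ (by omega) (fun x hx => hq x (by simp [hx]))
    exact this rs r.length (List.length_pos_iff.mpr (h r (by simp)))
      (fun x hx => h x (by simp [hx]))

lemma pvGetD_tail (r : List String) (j : Nat) :
    r.tail.getD j "" = r.getD (j + 1) "" := by
  cases r <;> simp

-- zip(*rows) is the list of columns j < pvMinLen rows, column j = row-wise entries at j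
-- zip(*rows) is the list of columns j < pvMinLen rows, column j = row-wise entries at j
lemma pyZipStar_eq (rows : List (List String)) :
    pyZipStar rows
      = (List.range (pvMinLen rows)).map (fun j => rows.map (fun r => r.getD j "")) := by
  by_cases h : rows = [] ∨ rows.any List.isEmpty
  · rw [pyZipStar, if_pos h]
    rcases h with h | h
    · subst h; simp [pvMinLen]
    · rcases List.any_eq_true.mp h with ⟨r, hr, he⟩
      have h0 : pvMinLen rows = 0 := by
        have h1 := pvMinLen_le rows r hr
        rw [List.isEmpty_iff.mp he] at h1
        simpa using h1
      simp [h0]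
  · have ih := pyZipStar_eq (rows.map List.tail)
    rw [pyZipStar, if_neg h]
    simp only [not_or, List.any_eq_true, not_exists, not_and] at h
    obtain ⟨h1, h2⟩ := h
    have hne : ∀ r ∈ rows, r ≠ [] := by
      intro r hr he; exact h2 r hr (by simp [he])
    have hpos : 1 ≤ pvMinLen rows := pvMinLen_pos rows h1 hne
    have htl : pvMinLen (rows.map List.tail) = pvMinLen rows - 1 := pvMinLen_tail rows h1
    obtain ⟨n, hn⟩ : ∃ n, pvMinLen rows = n + 1 := ⟨pvMinLen rows - 1, by omega⟩
    rw [ih, htl, hn]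
    simp only [Nat.add_sub_cancel, List.range_succ_eq_map, List.map_cons, List.map_map]
    congr 1
    · apply List.map_congr_left
      intro r _
      cases r <;> simp
    · apply List.map_congr_left
      intro j _
      simp only [Function.comp_apply, Function.comp_def]
      apply List.map_congr_left
      intro r _
      exact pvGetD_tail r j
termination_by (rows.headD []).length
decreasing_by
  simp only [not_or, List.any_eq_true, not_exists, not_and] at h
  obtain ⟨h1, h2⟩ := h
  match rows, h1, h2 with
  | r :: rs, _, h2 =>
    have hr : r ≠ [] := fun he => h2 r (by simp) (by simp [he])
    cases r with
    | nil => exact absurd rfl hr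
    | cons x xs => simp

-- zipping a range-indexed list with a long enough row pairs each index's value with the cell
lemma pvZipRange {α : Type} (n : Nat) (f : Nat → α) (row : List String) (h : n ≤ row.length) :
    (((List.range n).map f).zip row)
      = (List.range n).map (fun j => (f j, row.getD j "")) := by
  apply List.ext_getElem
  · simp [Nat.min_eq_left h]
  · intro i h1 h2
    have hi : i < n := by simpa using h2
    have hir : i < row.length := lt_of_lt_of_le hi h
    simp [List.getElem_zip, List.getD_eq_getElem?_getD, List.getElem?_eq_getElem hir]

-- B's row-wise fold computes, per column j, "some row has DENIED / GRANTED at j"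
lemma pvFoldB (p : List (List String)) (n : Nat) (f : Nat → Bool × Bool)
    (h : ∀ row ∈ p, n ≤ row.length) :
    p.foldl
        (fun st row =>
          (st.zip row).map (fun q => (q.1.1 || q.2 == "-1", q.1.2 || q.2 == "1")))
        ((List.range n).map f)
      = (List.range n).map (fun j =>
          ((f j).1 || p.any (fun row => row.getD j "" == "-1"),
           (f j).2 || p.any (fun row => row.getD j "" == "1"))) := by
  induction p generalizing f with
  | nil => simp
  | cons row p ih =>
    simp only [List.foldl_cons]
    rw [pvZipRange n f row (h row (by simp)), List.map_map]
    rw [show ((fun q : (Bool × Bool) × String => (q.1.1 || q.2 == "-1", q.1.2 || q.2 == "1"))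
          ∘ fun j => (f j, row.getD j ""))
        = (fun j => ((f j).1 || row.getD j "" == "-1", (f j).2 || row.getD j "" == "1"))
      from rfl]
    rw [ih (fun j => ((f j).1 || row.getD j "" == "-1", (f j).2 || row.getD j "" == "1"))
        (fun q hq => h q (by simp [hq]))]
    apply List.map_congr_left
    intro j _
    simp [Bool.or_assoc]

-- membership in a column is the row-wise any
lemma pvMemCol (t : List (List String)) (j : Nat) (v : String) :
    (v ∈ t.map (fun r => r.getD j "")) ↔ (t.any (fun row => row.getD j "" == v) = true) := by
  rw [List.mem_map]
  simp only [List.any_eq_true, beq_iff_eq]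

-- ===== VERDICT (by name: the statement is the Claim_ definition above) =====
theorem resolve_access_spec : Claim_equal_resolve_access := by
  intro t _
  unfold Spec_resolve_access
  cases t with
  | nil => simp [resolve_access, resolve_access_alt, pyZipStar]
  | cons r rs =>
    show resolve_access (r :: rs) =
      (((r :: rs).foldl
          (fun st row => (st.zip row).map (fun p => (p.1.1 || p.2 == "-1", p.1.2 || p.2 == "1")))
          (List.replicate (rs.foldl (fun m row => min m row.length) r.length)
            ((false : Bool), (false : Bool)))).map
        (fun p => if p.1 = true then "-1" else if p.2 = true then "1" else "0"))
    unfold resolve_access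
    rw [pyZipStar_eq]
    set n := rs.foldl (fun m row => min m row.length) r.length with hn
    have hnm : pvMinLen (r :: rs) = n := rfl
    rw [hnm]
    have hrepl : (List.replicate n ((false : Bool), (false : Bool)))
        = (List.range n).map (fun _ => (false, false)) := by
      simp
    rw [hrepl, pvFoldB _ n _ (fun row hrow => hnm ▸ pvMinLen_le (r :: rs) row hrow)]
    rw [show (fun (answer : List String) (column : List String) =>
          if "-1" ∈ column then answer ++ ["-1"]
          else if "1" ∈ column then answer ++ ["1"]
          else answer ++ ["0"])
        = (fun answer column => answer ++ [if "-1" ∈ column then "-1"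
            else if "1" ∈ column then "1" else "0"]) by
      funext a c; split_ifs <;> rfl]
    rw [show List.foldl (fun (answer : List String) column =>
          answer ++ [if "-1" ∈ column then "-1" else if "1" ∈ column then "1" else "0"]) []
          ((List.range n).map fun j => (r :: rs).map fun row => row.getD j "")
        = [] ++ ((List.range n).map fun j => (r :: rs).map fun row => row.getD j "").map
            (fun column => if "-1" ∈ column then "-1" else if "1" ∈ column then "1" else "0")
      from PySem.List.foldl_append_singleton_eq_map _ _ []]
    rw [List.nil_append, List.map_map, List.map_map]
    apply List.map_congr_left
    intro j _
    simp only [Function.comp_apply, Bool.false_or]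
    by_cases hd : "-1" ∈ (r :: rs).map (fun r => r.getD j "")
    · rw [if_pos hd, if_pos ((pvMemCol _ _ _).mp hd)]
    · rw [if_neg hd, if_neg (fun hb => hd ((pvMemCol _ _ _).mpr hb))]
      by_cases hg : "1" ∈ (r :: rs).map (fun r => r.getD j "")
      · rw [if_pos hg, if_pos ((pvMemCol _ _ _).mp hg)]
      · rw [if_neg hg, if_neg (fun hb => hg ((pvMemCol _ _ _).mpr hb))]
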